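-- pv_equiv track=rewrite | github.com/bee0511/Cryptography-Engineering | HW3/110550164.py | rearrange_plaintext
-- ===== SOURCE A (Python) =====
-- def rearrange_plaintext(plain_text):
--     rearranged = ""
--     for j in range(len(plain_text[0])):
--         for i in range(len(plain_text)):
--             if (j >= len(plain_text[i])):
--                 return rearranged
--             rearranged += plain_text[i][j]
--     return rearranged
-- ===== SOURCE B (Python) =====
-- def rearrange_plaintext(plain_text):
--     n = len(plain_text[0])
--     m = min(n, min(len(r) for r in plain_text))
--     full = ''.join(r[j] for j in range(m) for r in plain_text)
--     if m == n:
--         return full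
--     partial = []
--     for r in plain_text:
--         if len(r) <= m:
--             break
--         partial.append(r[m])
--     return full + ''.join(partial)
-- ===== Notes on version B (the rewrite author's own statement) =====
-- stated objective: alternative
-- what changed: Replaces the nested loop with an early return by a closed-form decomposition: compute the cut column m = min(width of first row, shortest row), join the m full columns directly, and append the partial column as a takewhile of rows longer than m.
import Mathlib
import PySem

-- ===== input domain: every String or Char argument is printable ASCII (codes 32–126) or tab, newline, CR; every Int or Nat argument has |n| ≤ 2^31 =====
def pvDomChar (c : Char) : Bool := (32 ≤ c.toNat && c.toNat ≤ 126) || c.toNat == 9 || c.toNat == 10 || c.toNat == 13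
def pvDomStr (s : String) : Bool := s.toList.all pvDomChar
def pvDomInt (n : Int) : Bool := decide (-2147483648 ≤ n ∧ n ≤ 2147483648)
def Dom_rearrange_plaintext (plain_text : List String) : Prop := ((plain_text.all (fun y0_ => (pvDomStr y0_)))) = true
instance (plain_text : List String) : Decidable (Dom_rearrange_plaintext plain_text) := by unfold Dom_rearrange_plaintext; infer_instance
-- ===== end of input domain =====

-- One honest line: B replaces A's nested early-return loop by a closed form (cut column m,
-- full columns joined, partial column as a takeWhile); proved equal to A on nonempty input.

-- ===== PORT A =====
-- inner `for i` loop of one column j: .inl = early `return rearranged`, .inr = column finished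
def pvA_col (rows : List String) (j : Nat) (acc : List Char) : List Char ⊕ List Char :=
  match rows with
  | [] => .inr acc
  | r :: rs =>
      if r.toList.length ≤ j then .inl acc
      else pvA_col rs j (acc ++ [r.toList.getD j ' '])

-- outer `for j in range(n)` loop
def pvA_go (rows : List String) (j n : Nat) (acc : List Char) : List Char :=
  if _h : j < n then
    match pvA_col rows j acc with
    | .inl fin => fin
    | .inr acc' => pvA_go rows (j+1) n acc'
  else acc
termination_by n - j

def rearrange_plaintext (plain_text : List String) : String :=
  -- plain_text[0] raises IndexError on []; excluded by Pre_, headD "" is arbitrary there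
  String.mk (pvA_go plain_text 0 (plain_text.headD "").toList.length [])

-- ===== PORT B =====
def rearrange_plaintext_alt (plain_text : List String) : String :=
  let n := (plain_text.headD "").toList.length
  let lens := plain_text.map (fun r => r.toList.length)
  let m := min n (lens.min?.getD n)
  let full := (List.range m).flatMap (fun j => plain_text.map (fun r => r.toList.getD j ' '))
  if m = n then String.mk full
  else String.mk (full ++
    (plain_text.takeWhile (fun r => m < r.toList.length)).map (fun r => r.toList.getD m ' '))

-- ===== PRECONDITION & SPEC =====
-- A evaluates plain_text[0]: the empty list raises IndexError, hence is excluded.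
def Pre_rearrange_plaintext (plain_text : List String) : Prop := plain_text ≠ []
instance (plain_text : List String) : Decidable (Pre_rearrange_plaintext plain_text) := by
  unfold Pre_rearrange_plaintext; infer_instance
def pvWitness_rearrange_plaintext : List String := ["abc", "de", "fgh"]

def Spec_rearrange_plaintext (plain_text : List String) (out : String) : Prop := out = rearrange_plaintext_alt plain_text
instance (plain_text : List String) (out : String) : Decidable (Spec_rearrange_plaintext plain_text out) := by unfold Spec_rearrange_plaintext; infer_instance

-- ===== CLAIM (what is proved, stated in full; the proofs are below) =====
def Claim_equal_rearrange_plaintext : Prop := ∀ (plain_text : List String), Dom_rearrange_plaintext plain_text → Pre_rearrange_plaintext plain_text → Spec_rearrange_plaintext plain_text (rearrange_plaintext plain_text)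

-- ===== LEMMAS AND PROOFS =====

-- column j of some rows, as B builds it
def pvCol (rows : List String) (j : Nat) : List Char :=
  rows.map (fun r => r.toList.getD j ' ')

-- inner loop when every row is long enough: column completes
lemma pvA_col_inr (rows : List String) (j : Nat) (acc : List Char)
    (h : ∀ r ∈ rows, j < r.toList.length) :
    pvA_col rows j acc = .inr (acc ++ pvCol rows j) := by
  induction rows generalizing acc with
  | nil => simp [pvA_col, pvCol]
  | cons r rs ih =>
      have hr := h r (by simp)
      simp only [pvA_col, pvCol, List.map_cons]
      rw [if_neg (by omega)]
      rw [ih _ (fun s hs => h s (by simp [hs]))]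
      simp [pvCol]

-- inner loop when some row is short: early return with the partial column
lemma pvA_col_inl (rows : List String) (j : Nat) (acc : List Char)
    (h : ∃ r ∈ rows, r.toList.length ≤ j) :
    pvA_col rows j acc =
      .inl (acc ++ (rows.takeWhile (fun r => j < r.toList.length)).map (fun r => r.toList.getD j ' ')) := by
  induction rows generalizing acc with
  | nil => simp at h
  | cons r rs ih =>
      by_cases hr : r.toList.length ≤ j
      · have hr2 : ¬ j < r.toList.length := Nat.not_lt.mpr hr
        simp only [String.length_toList] at hr hr2
        simp [pvA_col, hr, hr2]
      · have hrs : ∃ s ∈ rs, s.toList.length ≤ j := by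
          rcases h with ⟨s, hs, hsl⟩
          rcases List.mem_cons.mp hs with rfl | hs'
          · exact absurd hsl hr
          · exact ⟨s, hs', hsl⟩
        simp only [pvA_col]
        rw [if_neg hr, ih _ hrs]
        have hr2 : j < r.toList.length := Nat.lt_of_not_le hr
        simp only [String.length_toList] at hr2
        simp [hr2]

-- the outer loop from column j, characterized in closed form
lemma pvA_go_eq (rows : List String) (n m : Nat) (hm : m ≤ n)
    (hall : ∀ r ∈ rows, m ≤ r.toList.length)
    (hcut : m < n → ∃ r ∈ rows, r.toList.length = m)
    (j : Nat) (acc : List Char) (hj : j ≤ m) :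
    pvA_go rows j n acc =
      acc ++ (List.range' j (m - j)).flatMap (fun k => pvCol rows k) ++
        (if m < n then (rows.takeWhile (fun r => m < r.toList.length)).map (fun r => r.toList.getD m ' ') else []) := by
  by_cases hjm : j < m
  · -- full column j, recurse
    rw [pvA_go, dif_pos (by omega)]
    rw [pvA_col_inr rows j acc (fun r hr => lt_of_lt_of_le hjm (hall r hr))]
    simp only
    rw [pvA_go_eq rows n m hm hall hcut (j+1) _ (by omega)]
    have h1 : m - j = (m - (j+1)) + 1 := by omega
    rw [h1, List.range'_succ, List.flatMap_cons]
    simp [List.append_assoc]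
  · -- j = m
    have hjm' : j = m := le_antisymm hj (Nat.le_of_not_lt hjm)
    subst hjm'
    by_cases hn : j < n
    · rw [pvA_go, dif_pos hn]
      rcases hcut hn with ⟨r, hr, hrl⟩
      rw [pvA_col_inl rows j acc ⟨r, hr, le_of_eq hrl⟩]
      simp [hn]
    · have : j = n := by omega
      rw [pvA_go, dif_neg (by omega)]
      simp [if_neg (by omega : ¬j < n)]
termination_by m - j

-- ===== VERDICT (by name: the statement is the Claim_ definition above) =====
theorem rearrange_plaintext_spec : Claim_equal_rearrange_plaintext := by
  unfold Claim_equal_rearrange_plaintext Spec_rearrange_plaintext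
  intro pt _ hpre
  cases pt with
  | nil => exact absurd rfl hpre
  | cons r rs =>
    unfold rearrange_plaintext rearrange_plaintext_alt
    simp only [List.headD_cons]
    obtain ⟨m0, hsome⟩ : ∃ m0, ((r :: rs).map (fun s => s.toList.length)).min? = some m0 := by
      cases h : ((r :: rs).map (fun s => s.toList.length)).min? with
      | none => simp at h
      | some x => exact ⟨x, rfl⟩
    simp only [hsome, Option.getD_some]
    set n := r.toList.length with hn
    set m := min n m0 with hm
    have hmle : m ≤ n := Nat.min_le_left _ _
    have hlb : ∀ b ∈ (r :: rs).map (fun s => s.toList.length), m0 ≤ b :=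
      (List.le_min?_iff hsome).mp le_rfl
    have hall : ∀ s ∈ (r :: rs), m ≤ s.toList.length := fun s hs =>
      le_trans (Nat.min_le_right n m0) (hlb _ (List.mem_map_of_mem hs))
    have hcut : m < n → ∃ s ∈ (r :: rs), s.toList.length = m := by
      intro hlt
      have hm0mem := List.min?_mem hsome
      rcases List.mem_map.mp hm0mem with ⟨s, hs, hsl⟩
      exact ⟨s, hs, by omega⟩
    have key := pvA_go_eq (r :: rs) n m hmle hall hcut 0 [] (Nat.zero_le m)
    rw [key, List.range_eq_range']
    simp only [List.nil_append, Nat.sub_zero]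
    by_cases hmn : m = n
    · simp [hmn, pvCol]
    · have hlt : m < n := lt_of_le_of_ne hmle hmn
      simp [hmn, hlt, pvCol]
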